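-- pv_equiv track=rewrite | github.com/shayConcepts/device-checker | device_checker/data_gen.py | parse_out
-- ===== SOURCE A (Python) =====
-- from typing import List
--
-- def keep_object(item_name: str, obj: dict) -> bool:
--     """
--     Determine if obj should be filtered out
--
--     :param item_name: Name of item
--     :param obj: Object to check
--     :return: If obj should be kept
--     """
--
--     if item_name == 'Services':
--         path_name = obj.get('PathName', '')
--         if path_name.lower().startswith(r'C:\WINDOWS\System32\svchost.exe -k'.lower()):
--             return False
--
--     return True
--
-- def parse_out(item_name: str, text: str) -> List[dict]:
--     """
--     Parse the output of WMIC command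
--
--     :param item_name:
--     :param text:
--     :return: List of objects from output
--     """
--
--     objects = []
--     obj = {}
--     blank_line_counter = 0
--     lines = text.splitlines()
--     for line in lines:
--         line = line.strip()
--
--         if line == '':
--             blank_line_counter += 1
--             continue
--
--         if blank_line_counter == 5:
--             # blank_line_counter = 0
--             if keep_object(item_name, obj):  # TODO only use keep_object on diff?
--                 objects.append(obj)
--             obj = {}
--             # continue
--
--         blank_line_counter = 0
--         split = line.split('=')
--
--         key = split[0]
--         value = '='.join(split[1:])
--         obj[key] = value.strip()
--
--     if keep_object(item_name, obj):  # TODO only use keep_object on diff?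
--         objects.append(obj)
--
--     return objects
-- ===== SOURCE B (Python) =====
-- def keep_object(item_name: str, obj: dict) -> bool:
--     if item_name == 'Services':
--         path_name = obj.get('PathName', '')
--         if path_name.lower().startswith(r'C:\WINDOWS\System32\svchost.exe -k'.lower()):
--             return False
--     return True
--
--
-- def _to_obj(rec):
--     obj = {}
--     for ln in rec:
--         split = ln.split('=')
--         obj[split[0]] = '='.join(split[1:]).strip()
--     return obj
--
--
-- def parse_out(item_name: str, text: str):
--     # Pass 1: segment the stripped non-blank lines into records, starting a new
--     # record whenever a non-blank line follows a run of exactly 5 blank lines.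
--     finished = []
--     current = []
--     blanks = 0
--     for raw in text.splitlines():
--         line = raw.strip()
--         if not line:
--             blanks += 1
--         else:
--             if blanks == 5:
--                 finished.append(current)
--                 current = []
--             blanks = 0
--             current.append(line)
--     # Pass 2: turn each record (the trailing one included, even when empty)
--     # into a dict and keep those keep_object accepts.
--     return [o for o in map(_to_obj, finished + [current]) if keep_object(item_name, o)]
-- ===== Notes on version B (the rewrite author's own statement) =====
-- stated objective: alternative
-- what changed: Replaces A's single streaming loop that mutates one dict and a result list in lock-step with a two-pass decomposition: first segment the stripped lines into records on exactly-5-blank-line gaps, then map each record to a dict and filter with keep_object.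
import Mathlib
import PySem

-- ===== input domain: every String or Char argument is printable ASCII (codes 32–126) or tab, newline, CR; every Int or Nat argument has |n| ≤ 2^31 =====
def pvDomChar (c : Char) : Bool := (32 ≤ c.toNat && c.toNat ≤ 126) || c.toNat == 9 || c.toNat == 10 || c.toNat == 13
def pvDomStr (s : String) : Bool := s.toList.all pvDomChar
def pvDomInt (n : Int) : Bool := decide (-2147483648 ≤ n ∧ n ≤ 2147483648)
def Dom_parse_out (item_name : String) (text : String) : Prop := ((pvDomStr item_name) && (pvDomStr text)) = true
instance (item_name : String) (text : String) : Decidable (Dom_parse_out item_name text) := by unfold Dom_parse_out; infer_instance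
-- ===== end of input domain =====

-- B is the same task decomposed into two passes (segment lines into records, then map records
-- to dicts and filter) instead of A's single streaming loop; same cost, alternative structure.

-- ===== PORT A =====
-- shared module helper keep_object (both Pythons define it identically)
def keepObject (item_name : String) (obj : PySem.Dict String String) : Bool :=
  if item_name == "Services" then
    let path_name := obj.getD "PathName" ""
    if PySem.Str.startswith (PySem.Str.lower path_name)
        (PySem.Str.lower "C:\\WINDOWS\\System32\\svchost.exe -k") then false
    else true
  else true

-- one iteration of A's for-loop; state = (objects, obj, blank_line_counter)
def parseStepA (item_name : String)
    (st : List (PySem.Dict String String) × PySem.Dict String String × Nat)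
    (raw : String) : List (PySem.Dict String String) × PySem.Dict String String × Nat :=
  let line := PySem.Str.strip raw
  if line == "" then (st.1, st.2.1, st.2.2 + 1)
  else
    let objects := st.1
    let obj := st.2.1
    let p := if st.2.2 == 5 then
        ((if keepObject item_name obj then objects ++ [obj] else objects), PySem.Dict.empty)
      else (objects, obj)
    -- split = line.split('='); key = split[0] (split('=') is never empty, so headD is exact)
    let split := (PySem.Str.split? line "=").getD []
    let key := split.headD ""
    let value := PySem.Str.join "=" (split.drop 1)
    (p.1, p.2.insert key (PySem.Str.strip value), 0)

def parse_out (item_name : String) (text : String) : List (List (String × String)) :=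
  let st := (PySem.Str.splitlines text).foldl (parseStepA item_name)
      ([], PySem.Dict.empty, 0)
  let objects := if keepObject item_name st.2.1 then st.1 ++ [st.2.1] else st.1
  objects.map PySem.Dict.items

-- ===== PORT B =====
-- _to_obj: one record's lines to a dict
def toObjB (rec : List String) : PySem.Dict String String :=
  rec.foldl (fun d ln =>
    let split := (PySem.Str.split? ln "=").getD []
    d.insert (split.headD "") (PySem.Str.strip (PySem.Str.join "=" (split.drop 1))))
    PySem.Dict.empty

-- one iteration of B's segmentation loop; state = (finished, current, blanks)
def segStepB (st : List (List String) × List String × Nat) (raw : String) :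
    List (List String) × List String × Nat :=
  let line := PySem.Str.strip raw
  if line == "" then (st.1, st.2.1, st.2.2 + 1)
  else
    let p := if st.2.2 == 5 then (st.1 ++ [st.2.1], ([] : List String)) else (st.1, st.2.1)
    (p.1, p.2 ++ [line], 0)

def parse_out_alt (item_name : String) (text : String) : List (List (String × String)) :=
  let st := (PySem.Str.splitlines text).foldl segStepB ([], [], 0)
  ((((st.1 ++ [st.2.1]).map toObjB).filter (keepObject item_name)).map PySem.Dict.items)

-- ===== PRECONDITION & SPEC =====
def Spec_parse_out (item_name : String) (text : String) (out : List (List (String × String))) : Prop := out = parse_out_alt item_name text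
instance (item_name : String) (text : String) (out : List (List (String × String))) : Decidable (Spec_parse_out item_name text out) := by unfold Spec_parse_out; infer_instance

-- ===== CLAIM (what is proved, stated in full; the proofs are below) =====
def Claim_equal_parse_out : Prop := ∀ (item_name : String) (text : String), Dom_parse_out item_name text → Spec_parse_out item_name text (parse_out item_name text)

-- ===== LEMMAS AND PROOFS =====

-- appending a line to a record shifts through _to_obj as one dict insert
theorem toObjB_append (rec : List String) (ln : String) :
    toObjB (rec ++ [ln]) =
      (toObjB rec).insert (((PySem.Str.split? ln "=").getD []).headD "")
        (PySem.Str.strip (PySem.Str.join "=" (((PySem.Str.split? ln "=").getD []).drop 1))) := by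
  simp [toObjB, List.foldl_append]

theorem toObjB_singleton (ln : String) :
    toObjB [ln] =
      PySem.Dict.empty.insert (((PySem.Str.split? ln "=").getD []).headD "")
        (PySem.Str.strip (PySem.Str.join "=" (((PySem.Str.split? ln "=").getD []).drop 1))) := by
  simp [toObjB]

-- loop invariant: A's fold state is the image of B's fold state
theorem loop_inv (item_name : String) (l : List String)
    (finished : List (List String)) (current : List String) (cnt : Nat) :
    l.foldl (parseStepA item_name)
        (((finished.map toObjB).filter (keepObject item_name)), toObjB current, cnt)
      = (let b := l.foldl segStepB (finished, current, cnt)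
         (((b.1.map toObjB).filter (keepObject item_name)), toObjB b.2.1, b.2.2)) := by
  induction l generalizing finished current cnt with
  | nil => rfl
  | cons raw rest ih =>
    simp only [List.foldl_cons]
    by_cases hb : PySem.Str.strip raw == ""
    · simpa [parseStepA, segStepB, hb] using ih finished current (cnt + 1)
    · by_cases h5 : cnt == 5
      · have := ih (finished ++ [current]) [PySem.Str.strip raw] 0
        by_cases hk : keepObject item_name (toObjB current)
        · simpa [parseStepA, segStepB, hb, h5, toObjB_singleton,
            List.filter_append, List.filter_singleton, hk] using this
        · simpa [parseStepA, segStepB, hb, h5, toObjB_singleton,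
            List.filter_append, List.filter_singleton, hk] using this
      · have := ih finished (current ++ [PySem.Str.strip raw]) 0
        simpa [parseStepA, segStepB, hb, h5, toObjB_append] using this

-- ===== VERDICT (by name: the statement is the Claim_ definition above) =====
theorem parse_out_spec : Claim_equal_parse_out := by
  intro item_name text _
  unfold Spec_parse_out parse_out parse_out_alt
  have h := loop_inv item_name (PySem.Str.splitlines text) [] [] 0
  simp only [List.map_nil, List.filter_nil] at h
  have hc : toObjB [] = PySem.Dict.empty := rfl
  rw [hc] at h
  rw [h]
  simp only [List.map_append, List.filter_append]
  by_cases hk : keepObject item_name (toObjB ((PySem.Str.splitlines text).foldl segStepB ([], [], 0)).2.1)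
  · simp [hk]
  · simp [hk]
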